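-- pv_equiv track=rewrite | github.com/sun-hainan/Python | searches/binary_search.py | binary_search_with_duplicates
-- ===== SOURCE A (Python) =====
-- def binary_search_with_duplicates(sorted_collection: list[int], item: int) -> list[int]:
--     """
--     二分搜索（支持重复元素）
--
--     当目标值出现多次时，返回所有出现位置的索引列表。
--
--     算法思想：
--         1. 使用 lower_bound 找到第一个 >= 目标值的位置
--         2. 使用 upper_bound 找到第一个 > 目标值的位置
--         3. 两者之间的所有位置都是目标值出现的位置
--
--     示例:
--         >>> binary_search_with_duplicates([1, 2, 2, 2, 3], 2)
--         [1, 2, 3]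
--         >>> binary_search_with_duplicates([1, 2, 2, 2, 3], 4)
--         []
--     """
--     if list(sorted_collection) != sorted(sorted_collection):
--         raise ValueError("sorted_collection 必须是升序排列")
--
--     def lower_bound(sorted_collection: list[int], item: int) -> int:
--         """查找第一个 >= item 的位置（左边界）"""
--         left = 0
--         right = len(sorted_collection)
--         while left < right:
--             midpoint = left + (right - left) // 2
--             current_item = sorted_collection[midpoint]
--             if current_item < item:
--                 left = midpoint + 1
--             else:
--                 right = midpoint
--         return left
--
--     def upper_bound(sorted_collection: list[int], item: int) -> int:
--         """查找第一个 > item 的位置（右边界）"""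
--         left = 0
--         right = len(sorted_collection)
--         while left < right:
--             midpoint = left + (right - left) // 2
--             current_item = sorted_collection[midpoint]
--             if current_item <= item:
--                 left = midpoint + 1
--             else:
--                 right = midpoint
--         return left
--
--     left = lower_bound(sorted_collection, item)
--     right = upper_bound(sorted_collection, item)
--
--     if left == len(sorted_collection) or sorted_collection[left] != item:
--         return []  # 未找到
--     return list(range(left, right))
-- ===== SOURCE B (Python) =====
-- def binary_search_with_duplicates(sorted_collection: list[int], item: int) -> list[int]:
--     """Linear single pass: collect every index whose element equals item.
--
--     Since the collection is verified ascending, these indices are exactly the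
--     contiguous block range(lower_bound, upper_bound) that A computes.
--     """
--     if list(sorted_collection) != sorted(sorted_collection):
--         raise ValueError("sorted_collection 必须是升序排列")
--     return [i for i, x in enumerate(sorted_collection) if x == item]
-- ===== Notes on version B (the rewrite author's own statement) =====
-- stated objective: simpler
-- what changed: Replaced the two hand-written binary-search bounds and the range construction with a single linear enumerate-and-filter pass; on a verified-sorted list the matching indices are contiguous, so the results coincide.
import Mathlib
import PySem

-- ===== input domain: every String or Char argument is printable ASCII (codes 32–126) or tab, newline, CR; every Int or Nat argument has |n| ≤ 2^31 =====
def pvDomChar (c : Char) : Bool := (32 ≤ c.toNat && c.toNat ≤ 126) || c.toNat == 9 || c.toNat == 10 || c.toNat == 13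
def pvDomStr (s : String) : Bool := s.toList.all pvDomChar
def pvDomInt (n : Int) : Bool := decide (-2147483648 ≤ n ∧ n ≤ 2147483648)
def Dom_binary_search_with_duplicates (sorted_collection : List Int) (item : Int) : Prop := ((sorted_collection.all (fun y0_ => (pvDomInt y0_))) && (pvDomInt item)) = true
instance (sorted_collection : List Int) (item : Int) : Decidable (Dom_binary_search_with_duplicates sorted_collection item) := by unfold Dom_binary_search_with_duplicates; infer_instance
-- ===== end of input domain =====

-- B replaces A's two binary-search bounds + range construction by one linear
-- enumerate-and-filter pass (objective: simpler); on a sorted list the matching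
-- indices are contiguous, so the return values coincide on all of Pre_.

-- ===== PORT A =====
-- while left < right: midpoint = left+(right-left)//2; if xs[midpoint] < item: left=midpoint+1 else right=midpoint
-- (l ≤ midpoint < r ≤ len, so the Python index is in range; getD with default 0 is exact here)
def pvLowerLoop (xs : List Int) (item : Int) (l r : Nat) : Nat :=
  if _h : l < r then
    let midpoint := l + (r - l) / 2
    if xs.getD midpoint 0 < item then pvLowerLoop xs item (midpoint + 1) r
    else pvLowerLoop xs item l midpoint
  else l
termination_by r - l
decreasing_by all_goals omega

def pvUpperLoop (xs : List Int) (item : Int) (l r : Nat) : Nat :=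
  if _h : l < r then
    let midpoint := l + (r - l) / 2
    if xs.getD midpoint 0 ≤ item then pvUpperLoop xs item (midpoint + 1) r
    else pvUpperLoop xs item l midpoint
  else l
termination_by r - l
decreasing_by all_goals omega

def binary_search_with_duplicates (sorted_collection : List Int) (item : Int) : List Int :=
  -- 'if list(sc) != sorted(sc): raise ValueError' — the raising branch is outside Pre_; [] stands for the raise
  if sorted_collection ≠ PySem.List.sorted sorted_collection (fun x => x) false then []
  else
    let left := pvLowerLoop sorted_collection item 0 sorted_collection.length
    let right := pvUpperLoop sorted_collection item 0 sorted_collection.length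
    if left = sorted_collection.length ∨ sorted_collection.getD left 0 ≠ item then []
    else PySem.List.pyRange (left : Int) (right : Int) 1

-- ===== PORT B =====
-- [i for i, x in enumerate(sorted_collection) if x == item]
def pvCollect (item : Int) : List Int → Nat → List Int
  | [], _ => []
  | x :: rest, i => if x = item then (i : Int) :: pvCollect item rest (i + 1) else pvCollect item rest (i + 1)

def binary_search_with_duplicates_alt (sorted_collection : List Int) (item : Int) : List Int :=
  if sorted_collection ≠ PySem.List.sorted sorted_collection (fun x => x) false then []  -- the raise, outside Pre_
  else pvCollect item sorted_collection 0

-- ===== PRECONDITION & SPEC =====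
-- Pre_ excludes exactly the inputs on which A raises ValueError (collection not in ascending order).
def Pre_binary_search_with_duplicates (sorted_collection : List Int) (item : Int) : Prop :=
  sorted_collection.Pairwise (· ≤ ·)
instance (sorted_collection : List Int) (item : Int) : Decidable (Pre_binary_search_with_duplicates sorted_collection item) := by unfold Pre_binary_search_with_duplicates; infer_instance

def pvWitness_binary_search_with_duplicates : List Int × Int := ([1, 2, 2, 2, 3], 2)

def Spec_binary_search_with_duplicates (sorted_collection : List Int) (item : Int) (out : List Int) : Prop := out = binary_search_with_duplicates_alt sorted_collection item
instance (sorted_collection : List Int) (item : Int) (out : List Int) : Decidable (Spec_binary_search_with_duplicates sorted_collection item out) := by unfold Spec_binary_search_with_duplicates; infer_instance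

-- ===== CLAIM (what is proved, stated in full; the proofs are below) =====
def Claim_equal_binary_search_with_duplicates : Prop := ∀ (sorted_collection : List Int) (item : Int), Dom_binary_search_with_duplicates sorted_collection item → Pre_binary_search_with_duplicates sorted_collection item → Spec_binary_search_with_duplicates sorted_collection item (binary_search_with_duplicates sorted_collection item)

-- ===== LEMMAS AND PROOFS =====

-- On a sorted list, a downward-closed predicate holds exactly on the first countP indices.
theorem pv_sorted_countP_iff (p : Int → Bool) (hmono : ∀ a b : Int, a ≤ b → p b = true → p a = true) :
    ∀ (xs : List Int), xs.Pairwise (· ≤ ·) →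
      ∀ i (hi : i < xs.length), (p xs[i] = true ↔ i < xs.countP p) := by
  intro xs
  induction xs with
  | nil => intro _ i hi; simp at hi
  | cons a xs ih =>
    intro hs i hi
    rcases List.pairwise_cons.mp hs with ⟨ha, hxs⟩
    by_cases h : p a = true
    · cases i with
      | zero => simp [List.countP_cons, h]
      | succ j =>
        have hj : j < xs.length := by simpa using hi
        have hih := ih hxs j hj
        simp only [List.getElem_cons_succ, List.countP_cons, h, if_true]
        rw [hih]
        omega
    · have hz : xs.countP p = 0 := by
        rw [List.countP_eq_zero]
        intro x hx hp
        exact h (hmono a x (ha x hx) hp)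
      cases i with
      | zero => simp [List.countP_cons, h, hz]
      | succ j =>
        have hj : j < xs.length := by simpa using hi
        have hmem : xs[j] ∈ xs := List.getElem_mem hj
        have hz2 : (a :: xs).countP p = 0 := by
          simp [List.countP_cons, hz, h]
        rw [List.getElem_cons_succ, hz2]
        constructor
        · intro hp
          exact absurd hp ((List.countP_eq_zero.mp hz) _ hmem)
        · intro hlt
          omega

theorem pv_sorted_lt_iff (xs : List Int) (item : Int) (hs : xs.Pairwise (· ≤ ·)) :
    ∀ i, i < xs.length → (xs.getD i 0 < item ↔ i < xs.countP (fun x => decide (x < item))) := by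
  intro i hi
  rw [List.getD_eq_getElem xs 0 hi]
  have := pv_sorted_countP_iff (fun x => decide (x < item))
    (fun a b hab hb => by simp only [decide_eq_true_eq] at *; omega) xs hs i hi
  simpa using this

theorem pv_sorted_le_iff (xs : List Int) (item : Int) (hs : xs.Pairwise (· ≤ ·)) :
    ∀ i, i < xs.length → (xs.getD i 0 ≤ item ↔ i < xs.countP (fun x => decide (x ≤ item))) := by
  intro i hi
  rw [List.getD_eq_getElem xs 0 hi]
  have := pv_sorted_countP_iff (fun x => decide (x ≤ item))
    (fun a b hab hb => by simp only [decide_eq_true_eq] at *; omega) xs hs i hi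
  simpa using this

theorem pvLowerLoop_eq (xs : List Int) (item : Int) (hs : xs.Pairwise (· ≤ ·)) :
    ∀ l r, l ≤ xs.countP (fun x => decide (x < item)) →
      xs.countP (fun x => decide (x < item)) ≤ r → r ≤ xs.length →
      pvLowerLoop xs item l r = xs.countP (fun x => decide (x < item)) := by
  intro l r
  induction hn : r - l using Nat.strong_induction_on generalizing l r with
  | _ n ih =>
  intro hl hr hlen
  rw [pvLowerLoop]
  split
  · rename_i h
    set m := l + (r - l) / 2 with hm
    have hmr : m < r := by omega
    have hml : m < xs.length := by omega
    have hiff := pv_sorted_lt_iff xs item hs m hml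
    by_cases hc : xs.getD m 0 < item
    · have := hiff.mp hc
      simp only [hc, if_true]
      exact ih (r - (m + 1)) (by omega) (m + 1) r rfl (by omega) hr hlen
    · have := fun hh => hc (hiff.mpr hh)
      simp only [hc, if_false]
      exact ih (m - l) (by omega) l m rfl hl (by omega) (by omega)
  · rename_i h; omega

theorem pvUpperLoop_eq (xs : List Int) (item : Int) (hs : xs.Pairwise (· ≤ ·)) :
    ∀ l r, l ≤ xs.countP (fun x => decide (x ≤ item)) →
      xs.countP (fun x => decide (x ≤ item)) ≤ r → r ≤ xs.length →
      pvUpperLoop xs item l r = xs.countP (fun x => decide (x ≤ item)) := by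
  intro l r
  induction hn : r - l using Nat.strong_induction_on generalizing l r with
  | _ n ih =>
  intro hl hr hlen
  rw [pvUpperLoop]
  split
  · rename_i h
    set m := l + (r - l) / 2 with hm
    have hmr : m < r := by omega
    have hml : m < xs.length := by omega
    have hiff := pv_sorted_le_iff xs item hs m hml
    by_cases hc : xs.getD m 0 ≤ item
    · have := hiff.mp hc
      simp only [hc, if_true]
      exact ih (r - (m + 1)) (by omega) (m + 1) r rfl (by omega) hr hlen
    · have := fun hh => hc (hiff.mpr hh)
      simp only [hc, if_false]
      exact ih (m - l) (by omega) l m rfl hl (by omega) (by omega)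
  · rename_i h; omega

theorem pvCollect_nil_of_none (item : Int) :
    ∀ (xs : List Int) (k : Nat), (∀ i, i < xs.length → xs.getD i 0 ≠ item) → pvCollect item xs k = [] := by
  intro xs
  induction xs with
  | nil => intro k _; rfl
  | cons x rest ih =>
    intro k hno
    have hx : x ≠ item := by simpa using hno 0 (by simp)
    simp only [pvCollect, hx, if_false]
    exact ih (k + 1) (fun i hi => by simpa using hno (i + 1) (by simpa using hi))

-- If "element = item" holds exactly on the absolute-index window [a, b), pvCollect returns that interval.
theorem pvCollect_interval (item : Int) :
    ∀ (xs : List Int) (k a b : Nat), k ≤ a → a ≤ b → b ≤ k + xs.length →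
      (∀ i, i < xs.length → (xs.getD i 0 = item ↔ (a ≤ k + i ∧ k + i < b))) →
      pvCollect item xs k = (List.range (b - a)).map (fun j => ((a + j : Nat) : Int)) := by
  intro xs
  induction xs with
  | nil =>
    intro k a b hk hab hb _
    have : b = a := by simp at hb; omega
    subst this
    simp [pvCollect]
  | cons x rest ih =>
    intro k a b hk hab hb hiff
    have h0 := hiff 0 (by simp)
    simp only [List.getD_cons_zero, Nat.add_zero] at h0
    by_cases hx : x = item
    · have hka : a ≤ k ∧ k < b := h0.mp hx
      have hak : a = k := le_antisymm hka.1 hk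
      rw [hak]
      simp only [pvCollect, hx, if_true]
      have hrec := ih (k + 1) (k + 1) b (le_refl _) (by omega) (by simp at hb ⊢; omega)
        (fun i hi => by
          have := hiff (i + 1) (by simpa using hi)
          simp only [List.getD_cons_succ] at this
          constructor
          · intro he; have := this.mp he; omega
          · intro hq; exact this.mpr (by omega))
      rw [hrec]
      have hbk : b - k = (b - (k + 1)) + 1 := by omega
      rw [hbk, List.range_succ_eq_map]
      simp only [List.map_cons, List.map_map]
      refine List.cons_eq_cons.mpr ⟨by omega, ?_⟩
      apply List.map_congr_left
      intro j _
      simp only [Function.comp_apply]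
      omega
    · rcases (not_and_or.mp (fun hh => hx (h0.mpr hh))) with hlt | hge
      · -- here k < a: the head index is below the window
        have hka : k < a := by omega
        simp only [pvCollect, hx, if_false]
        exact ih (k + 1) a b (by omega) hab (by simp at hb ⊢; omega)
          (fun i hi => by
            have := hiff (i + 1) (by simpa using hi)
            simp only [List.getD_cons_succ] at this
            constructor
            · intro he; have := this.mp he; omega
            · intro hq; exact this.mpr (by omega))
      · -- here b ≤ k: the window is empty, nothing ever matches
        have hba : b = a := by omega
        have hnil : pvCollect item (x :: rest) k = [] := by
          apply pvCollect_nil_of_none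
          intro i hi he
          have := (hiff i hi).mp he
          omega
        rw [hnil, hba]
        simp

theorem pv_countP_le (xs : List Int) (item : Int) :
    xs.countP (fun x => decide (x < item)) ≤ xs.countP (fun x => decide (x ≤ item)) := by
  apply List.countP_mono_left
  intro x _ h
  simp only [decide_eq_true_eq] at h ⊢
  exact le_of_lt h

-- ===== VERDICT (by name: the statement is the Claim_ definition above) =====
theorem binary_search_with_duplicates_spec : Claim_equal_binary_search_with_duplicates := by
  intro xs item _ hpre
  unfold Spec_binary_search_with_duplicates
  unfold Pre_binary_search_with_duplicates at hpre
  have hsorted : PySem.List.sorted xs (fun x => x) false = xs :=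
    PySem.List.sorted_eq_self_of_pairwise xs (fun x => x) (by simpa using hpre)
  set L := xs.countP (fun x => decide (x < item)) with hL
  set U := xs.countP (fun x => decide (x ≤ item)) with hU
  have hLU : L ≤ U := pv_countP_le xs item
  have hUlen : U ≤ xs.length := List.countP_le_length
  have hLlen : L ≤ xs.length := le_trans hLU hUlen
  have hlow : pvLowerLoop xs item 0 xs.length = L :=
    pvLowerLoop_eq xs item hpre 0 xs.length (Nat.zero_le _) hLlen (le_refl _)
  have hup : pvUpperLoop xs item 0 xs.length = U :=
    pvUpperLoop_eq xs item hpre 0 xs.length (Nat.zero_le _) hUlen (le_refl _)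
  have hiff : ∀ i, i < xs.length → (xs.getD i 0 = item ↔ (L ≤ i ∧ i < U)) := by
    intro i hi
    have h1 := pv_sorted_lt_iff xs item hpre i hi
    have h2 := pv_sorted_le_iff xs item hpre i hi
    constructor
    · intro he
      constructor
      · by_contra hc
        have : xs.getD i 0 < item := h1.mpr (by omega)
        omega
      · exact h2.mp (le_of_eq he)
    · intro hlu
      have hle : xs.getD i 0 ≤ item := h2.mpr hlu.2
      have hnlt : ¬ xs.getD i 0 < item := fun hc => by have := h1.mp hc; omega
      omega
  have hB : pvCollect item xs 0 = (List.range (U - L)).map (fun j => ((L + j : Nat) : Int)) :=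
    pvCollect_interval item xs 0 L U (Nat.zero_le _) hLU (by omega)
      (fun i hi => by simpa using hiff i hi)
  unfold binary_search_with_duplicates binary_search_with_duplicates_alt
  rw [hsorted]
  simp only [ne_eq, not_true_eq_false, if_false, hlow, hup, hB]
  by_cases hend : L = xs.length ∨ xs.getD L 0 ≠ item
  · have hUL : U = L := by
      rcases hend with h | h
      · omega
      · by_contra hc
        have hLlt : L < U := by omega
        have hLlen2 : L < xs.length := by omega
        exact h ((hiff L hLlen2).mpr ⟨le_refl _, hLlt⟩)
    rw [if_pos hend, hUL]
    simp
  · rw [if_neg hend, PySem.List.pyRange_one]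
    have hcast : ((U : Int) - (L : Int)).toNat = U - L := by omega
    rw [hcast]
    apply List.map_congr_left
    intro j _
    push_cast
    ring
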